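-- pv_equiv track=rewrite | github.com/thatMissingSock/dataStructureAndAlgorithmsRevision | week 2 (Nested Lists)/rowCycleII.py | row_cycle
-- ===== SOURCE A (Python) =====
-- def row_cycle(M, r):
--     """
--     This is the same thing except that we DON'T return a new matrix but rather modify the EXISTING matrix.
--     :param M: A matrix.
--     :param r: A value of how many cycles.
--     :return: A modified matrix.
--     """
--
--     tempMatrix = [None] * len(M)
--     max = len(M) - 1
--     for row in range(len(M)):
--         newPlacement = r + row
--         newPlacement %= (max + 1)
--         tempMatrix[newPlacement] = M[row]
--
--     for row in range(len(M)):
--         M[row] = tempMatrix[row]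
--
--     return M
-- ===== SOURCE B (Python) =====
-- def row_cycle(M, r):
--     n = len(M)
--     if n:
--         r %= n
--         M[:] = M[-r:] + M[:-r]
--     return M
-- ===== Notes on version B (the rewrite author's own statement) =====
-- stated objective: idiomatic
-- what changed: Replaces the per-row scatter into a temporary array (index arithmetic with % per row) plus copy-back loop by a single block rotation: reduce r mod n once and rebuild M as M[-r:] + M[:-r].
import Mathlib
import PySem

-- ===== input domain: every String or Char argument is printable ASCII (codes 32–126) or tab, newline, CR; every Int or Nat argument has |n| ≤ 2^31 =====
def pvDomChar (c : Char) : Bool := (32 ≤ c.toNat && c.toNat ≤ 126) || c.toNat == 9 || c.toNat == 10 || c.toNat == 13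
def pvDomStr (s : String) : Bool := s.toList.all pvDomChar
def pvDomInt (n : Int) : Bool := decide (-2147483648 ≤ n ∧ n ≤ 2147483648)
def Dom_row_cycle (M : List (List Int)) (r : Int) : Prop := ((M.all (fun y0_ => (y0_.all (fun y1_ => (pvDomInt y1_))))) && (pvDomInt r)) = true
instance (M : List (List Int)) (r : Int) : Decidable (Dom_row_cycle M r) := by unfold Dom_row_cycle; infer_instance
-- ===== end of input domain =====

-- B rebuilds the matrix by one block-slice rotation instead of A's per-row modular scatter
-- into a temporary array plus a copy-back loop (same O(n) cost; idiomatic objective).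
-- Python A and B both mutate M in place; the equivalence proved here is about the return value.

-- ===== PORT A =====
-- tempMatrix starts as [None]*n; the getD default [] in the read-back is unreachable
-- (every slot is written: row ↦ (r+row) % n is a bijection), matching Python where no None survives.
def row_cycle (M : List (List Int)) (r : Int) : List (List Int) :=
  let tempMatrix := (List.range M.length).foldl
    (fun t row => t.set (PySem.Int.mod (r + row) (((M.length : Int) - 1) + 1)).toNat (M.getD row []))
    (List.replicate M.length ([] : List Int))
  (List.range M.length).map (fun row => tempMatrix.getD row [])

-- ===== PORT B =====
def row_cycle_alt (M : List (List Int)) (r : Int) : List (List Int) :=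
  if M.length = 0 then M
  else
    let r' := PySem.Int.mod r M.length
    PySem.List.slice M (some (-r')) none ++ PySem.List.slice M none (some (-r'))

-- ===== PRECONDITION & SPEC =====
def Spec_row_cycle (M : List (List Int)) (r : Int) (out : List (List Int)) : Prop := out = row_cycle_alt M r
instance (M : List (List Int)) (r : Int) (out : List (List Int)) : Decidable (Spec_row_cycle M r out) := by unfold Spec_row_cycle; infer_instance

-- ===== CLAIM (what is proved, stated in full; the proofs are below) =====
def Claim_equal_row_cycle : Prop := ∀ (M : List (List Int)) (r : Int), Dom_row_cycle M r → Spec_row_cycle M r (row_cycle M r)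

-- ===== LEMMAS AND PROOFS =====

-- both sides equal this rotation-by-index description
def rotSpec (M : List (List Int)) (r : Int) : List (List Int) :=
  (List.range M.length).map (fun (j : Nat) => M.getD ((((j : Int) - r) % (M.length : Int)).toNat) [])

theorem emod_add_absorb (a x n : Int) : (a + x) % n = (a + x % n) % n := by
  conv_rhs => rw [Int.emod_def x n]
  have h : a + (x - n * (x / n)) = (a + x) + n * (-(x / n)) := by ring
  rw [h, Int.add_mul_emod_self_left]

theorem emod_sub_absorb (a x n : Int) : (a - x) % n = (a - x % n) % n := by
  conv_rhs => rw [Int.emod_def x n]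
  have h : a - (x - n * (x / n)) = (a - x) + n * (x / n) := by ring
  rw [h, Int.add_mul_emod_self_left]

theorem emod_sub_absorb' (x a n : Int) : (x - a) % n = (x % n - a) % n := by
  conv_rhs => rw [Int.emod_def x n]
  have h : x - n * (x / n) - a = (x - a) + n * (-(x / n)) := by ring
  rw [h, Int.add_mul_emod_self_left]

theorem emod_key (r n : Int) (j m : Int) (_hn : 0 < n) (hj0 : 0 ≤ j) (hj : j < n)
    (hm0 : 0 ≤ m) (hm : m < n) :
    ((j - r) % n = m ↔ j = (r + m) % n) := by
  constructor
  · intro h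
    have : (r + m) % n = j := by
      rw [← h, ← emod_add_absorb]
      have h2 : r + (j - r) = j := by ring
      rw [h2, Int.emod_eq_of_lt hj0 hj]
    omega
  · intro h
    rw [h, ← emod_sub_absorb']
    have h2 : r + m - r = m := by ring
    rw [h2, Int.emod_eq_of_lt hm0 hm]

theorem temp_len (M : List (List Int)) (r : Int) (L : List Nat) (t0 : List (List Int)) :
    (L.foldl (fun t row => t.set (((r + row) % (M.length:Int)).toNat) (M.getD row [])) t0).length
      = t0.length := by
  induction L generalizing t0 with
  | nil => rfl
  | cons a L ih => rw [List.foldl_cons, ih, List.length_set]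

theorem temp_get (M : List (List Int)) (r : Int) (hn : 0 < M.length)
    (m : Nat) (hm : m ≤ M.length) (j : Nat) (hj : j < M.length) :
    ((List.range m).foldl (fun t row => t.set (((r + row) % (M.length:Int)).toNat) (M.getD row []))
        (List.replicate M.length ([] : List Int)))[j]? =
      some (if ((((j:Int) - r) % (M.length:Int)).toNat < m)
            then M.getD ((((j:Int) - r) % (M.length:Int)).toNat) [] else []) := by
  induction m with
  | zero => simp [hj]
  | succ m ih =>
    have hm' : m ≤ M.length := by omega
    have hnpos : (0:Int) < (M.length:Int) := by exact_mod_cast hn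
    have hne : (M.length:Int) ≠ 0 := by omega
    have hrm0 : 0 ≤ (r + (m:Int)) % (M.length:Int) := Int.emod_nonneg _ hne
    have hrml : (r + (m:Int)) % (M.length:Int) < (M.length:Int) := Int.emod_lt_of_pos _ hnpos
    have hq0 : 0 ≤ ((j:Int) - r) % (M.length:Int) := Int.emod_nonneg _ hne
    have hql : ((j:Int) - r) % (M.length:Int) < (M.length:Int) := Int.emod_lt_of_pos _ hnpos
    rw [List.range_succ, List.foldl_append]
    simp only [List.foldl_cons, List.foldl_nil]
    rw [List.getElem?_set, temp_len]
    by_cases hij : ((r + (m:Int)) % (M.length:Int)).toNat = j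
    · have hje : (j:Int) = (r + (m:Int)) % (M.length:Int) := by omega
      have hkey : ((j:Int) - r) % (M.length:Int) = (m:Int) :=
        (emod_key r (M.length:Int) (j:Int) (m:Int) hnpos (by omega) (by exact_mod_cast hj)
          (by omega) (by exact_mod_cast (by omega : m < M.length))).mpr hje
      have hidx : (((j:Int) - r) % (M.length:Int)).toNat = m := by omega
      rw [if_pos hij, if_pos (by simp [List.length_replicate]; omega), hidx, if_pos (by omega)]
    · rw [if_neg hij, ih hm']
      have hnem : (((j:Int) - r) % (M.length:Int)).toNat ≠ m := by
        intro heq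
        have hkey : ((j:Int) - r) % (M.length:Int) = (m:Int) := by omega
        have := (emod_key r (M.length:Int) (j:Int) (m:Int) hnpos (by omega) (by exact_mod_cast hj)
          (by omega) (by exact_mod_cast (by omega : m < M.length))).mp hkey
        omega
      have hiff : ((((j:Int) - r) % (M.length:Int)).toNat < m + 1)
          ↔ ((((j:Int) - r) % (M.length:Int)).toNat < m) := by omega
      simp [hiff]

theorem map_getD_range (l : List (List Int)) :
    (List.range l.length).map (fun j => l.getD j []) = l := by
  apply List.ext_getElem?
  intro j
  by_cases hj : j < l.length
  · rw [List.getElem?_map, List.getElem?_range hj]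
    simp [List.getD_eq_getElem?_getD, List.getElem?_eq_getElem hj]
  · rw [List.getElem?_eq_none (by simpa using hj), List.getElem?_eq_none (by omega)]

theorem row_cycle_eq_rot (M : List (List Int)) (r : Int) : row_cycle M r = rotSpec M r := by
  rcases Nat.eq_zero_or_pos M.length with h0 | hn
  · simp [row_cycle, rotSpec, h0]
  · unfold row_cycle rotSpec
    have hd : ((M.length : Int) - 1) + 1 = (M.length : Int) := by ring
    have hnpos : (0:Int) < (M.length:Int) := by exact_mod_cast hn
    have hne : (M.length:Int) ≠ 0 := by omega
    simp only [hd, PySem.Int.mod_eq_emod_of_pos hnpos]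
    apply List.ext_getElem?
    intro j
    by_cases hj : j < M.length
    · rw [List.getElem?_map, List.getElem?_map, List.getElem?_range hj]
      simp only [Option.map_some]
      rw [List.getD_eq_getElem?_getD, temp_get M r hn M.length le_rfl j hj]
      have hql : (((j:Int) - r) % (M.length:Int)).toNat < M.length := by
        have h1 := Int.emod_lt_of_pos ((j:Int) - r) hnpos
        have h2 := Int.emod_nonneg ((j:Int) - r) hne
        omega
      simp [hql, List.getD_eq_getElem?_getD]
    · rw [List.getElem?_eq_none (by simp; omega), List.getElem?_eq_none (by simp; omega)]

theorem alt_eq_rot (M : List (List Int)) (r : Int) : row_cycle_alt M r = rotSpec M r := by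
  rcases Nat.eq_zero_or_pos M.length with h0 | hn
  · have hM : M = [] := List.length_eq_zero_iff.mp h0
    subst hM; rfl
  · have hnpos : (0:Int) < (M.length:Int) := by exact_mod_cast hn
    have hne0 : (M.length:Int) ≠ 0 := by omega
    have hr0 : 0 ≤ r % (M.length:Int) := Int.emod_nonneg _ hne0
    have hrl : r % (M.length:Int) < (M.length:Int) := Int.emod_lt_of_pos _ hnpos
    have hstep : ∀ j : Nat, j < M.length →
        ((j:Int) - r) % (M.length:Int) = ((j:Int) - r % (M.length:Int)) % (M.length:Int) :=
      fun j _ => emod_sub_absorb (j:Int) r (M.length:Int)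
    unfold row_cycle_alt
    rw [if_neg (by omega)]
    simp only [PySem.Int.mod_eq_emod_of_pos hnpos]
    set k : Nat := (r % (M.length:Int)).toNat with hkdef
    have hkc : ((k:Int)) = r % (M.length:Int) := by omega
    have hkl : k ≤ M.length := by omega
    by_cases hk0 : k = 0
    · have hz : r % (M.length:Int) = 0 := by omega
      rw [hz]
      norm_num
      rw [PySem.List.slice_to M (le_refl (0:Int))]
      simp only [Int.toNat_zero, List.take_zero, List.append_nil]
      unfold rotSpec
      have : ∀ j ∈ List.range M.length,
          M.getD (((j:Int) - r) % (M.length:Int)).toNat [] = M.getD j [] := by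
        intro j hjm
        have hj : j < M.length := List.mem_range.mp hjm
        rw [hstep j hj, hz]
        have : ((j:Int) - 0) % (M.length:Int) = (j:Int) := by
          rw [sub_zero, Int.emod_eq_of_lt (by omega) (by exact_mod_cast hj)]
        rw [this]
        simp
      rw [List.map_congr_left this, map_getD_range]
    · have hkpos : 0 < k := by omega
      rw [show -(r % (M.length:Int)) = -(k:Int) by omega,
        PySem.List.slice_from_neg_natCast M k hkpos, PySem.List.slice_to_neg_natCast M k hkpos]
      apply List.ext_getElem?
      intro j
      by_cases hj : j < M.length
      · have hdl : (M.drop (M.length - k)).length = k := by simp [List.length_drop]; omega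
        rw [List.getElem?_append, hdl]
        unfold rotSpec
        rw [List.getElem?_map, List.getElem?_range hj]
        simp only [Option.map_some]
        have hidx0 : 0 ≤ ((j:Int) - r) % (M.length:Int) := Int.emod_nonneg _ hne0
        have hidxl : ((j:Int) - r) % (M.length:Int) < (M.length:Int) := Int.emod_lt_of_pos _ hnpos
        by_cases hjk : j < k
        · have hval : ((j:Int) - r) % (M.length:Int) = (j:Int) - k + M.length := by
            rw [hstep j hj, ← hkc]
            have hsplit : (j:Int) - k = ((j:Int) - k + (M.length:Int)) + (M.length:Int) * (-1) := by ring
            conv_lhs => rw [hsplit]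
            rw [Int.add_mul_emod_self_left,
              Int.emod_eq_of_lt (by omega) (by omega)]
          have hidx : (((j:Int) - r) % (M.length:Int)).toNat = M.length - k + j := by omega
          rw [if_pos hjk, List.getElem?_drop, hidx,
            List.getElem?_eq_getElem (by omega : M.length - k + j < M.length),
            List.getD_eq_getElem?_getD,
            List.getElem?_eq_getElem (by omega : M.length - k + j < M.length)]
          rfl
        · have hval : ((j:Int) - r) % (M.length:Int) = (j:Int) - k := by
            rw [hstep j hj, ← hkc,
              Int.emod_eq_of_lt (by omega) (by omega)]
          have hidx : (((j:Int) - r) % (M.length:Int)).toNat = j - k := by omega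
          rw [if_neg hjk, List.getElem?_take, if_pos (by omega), hidx,
            List.getElem?_eq_getElem (by omega : j - k < M.length),
            List.getD_eq_getElem?_getD,
            List.getElem?_eq_getElem (by omega : j - k < M.length)]
          rfl
      · rw [List.getElem?_eq_none (by simp [List.length_drop, List.length_take]; omega)]
        unfold rotSpec
        rw [List.getElem?_eq_none (by simp; omega)]

-- ===== VERDICT (by name: the statement is the Claim_ definition above) =====
theorem row_cycle_spec : Claim_equal_row_cycle := by
  intro M r _
  unfold Spec_row_cycle
  rw [row_cycle_eq_rot, alt_eq_rot]
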